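-- pv_equiv track=rewrite | github.com/IrsIris501/25spring_DSAlgo | python_code/sy295.py | avail
-- ===== SOURCE A (Python) =====
-- class Stack:
--     def __init__(self):
--         self.item=[]
--     def push(self, item):
--         self.item.append(item)
--     def pop(self):
--         if self.item!=[]:
--             return self.item.pop()
--         else:
--             return None
--
-- def avail(l):
--     stack = Stack()
--     current = 0
--     for i in l:
--         popitem=stack.pop()
--         if i==popitem:
--             continue
--         elif i>current:
--             stack.push(popitem)
--             for j in range(current+1, i+1):
--                 stack.push(j)
--             current=i
--             stack.pop()
--         else:
--             return False
--     return True
-- ===== SOURCE B (Python) =====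
-- def avail(l):
--     # stack of maximal runs of consecutive integers, kept as (lo, hi) intervals
--     intervals = []
--     current = 0
--     for i in l:
--         if i > current:
--             if current + 1 <= i - 1:
--                 intervals.append((current + 1, i - 1))
--             current = i
--         elif intervals and intervals[-1][1] == i:
--             lo, hi = intervals.pop()
--             if lo <= hi - 1:
--                 intervals.append((lo, hi - 1))
--         else:
--             return False
--     return True
-- ===== Notes on version B (the rewrite author's own statement) =====
-- stated objective: faster
-- what changed: B replaces A's stack of individual integers (pushing every value from current+1 to i) by a stack of (lo,hi) intervals of consecutive integers, so each list element is processed in O(1) regardless of the magnitude of the values.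
import Mathlib
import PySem

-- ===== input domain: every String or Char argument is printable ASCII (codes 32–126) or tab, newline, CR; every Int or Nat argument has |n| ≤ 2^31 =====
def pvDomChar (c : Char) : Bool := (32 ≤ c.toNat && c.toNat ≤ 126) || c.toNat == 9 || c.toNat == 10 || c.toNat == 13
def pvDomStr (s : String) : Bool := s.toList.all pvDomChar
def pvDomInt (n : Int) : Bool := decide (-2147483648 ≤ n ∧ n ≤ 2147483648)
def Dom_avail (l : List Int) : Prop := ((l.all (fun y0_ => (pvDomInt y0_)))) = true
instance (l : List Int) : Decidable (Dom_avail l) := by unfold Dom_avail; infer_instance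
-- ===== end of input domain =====

-- B replaces A's stack of individual integers (pushing every value up to i) by a stack of
-- (lo,hi) intervals of consecutive integers, processing each element in O(1) of the value size.


-- ===== PORT A =====
-- Python's Stack stores ints and possibly the value None (A pushes back a popped None);
-- its elements are Option Int, and Stack.pop on the empty list also returns None.
def popA (s : List (Option Int)) : Option Int × List (Option Int) :=
  match s with
  | [] => (none, [])
  | x :: rest => (x, rest)

def availLoop : List Int → List (Option Int) → Int → Bool
  | [], _, _ => true
  | i :: rest, s, current =>
    let popitem := (popA s).1
    let s' := (popA s).2
    if (some i : Option Int) = popitem then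
      availLoop rest s' current
    else if i > current then
      availLoop rest
        (popA ((PySem.List.pyRange (current + 1) (i + 1) 1).foldl
          (fun acc j => some j :: acc) (popitem :: s'))).2 i
    else false

def avail (l : List Int) : Bool := availLoop l [] 0

-- ===== PORT B =====
def availAltLoop : List Int → List (Int × Int) → Int → Bool
  | [], _, _ => true
  | i :: rest, iv, current =>
    if i > current then
      availAltLoop rest (if current + 1 ≤ i - 1 then (current + 1, i - 1) :: iv else iv) i
    else
      match iv with
      | (lo, hi) :: t =>
        if hi = i then
          availAltLoop rest (if lo ≤ hi - 1 then (lo, hi - 1) :: t else t) current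
        else false
      | [] => false

def avail_alt (l : List Int) : Bool := availAltLoop l [] 0

-- ===== PRECONDITION & SPEC =====
def Spec_avail (l : List Int) (out : Bool) : Prop := out = avail_alt l
instance (l : List Int) (out : Bool) : Decidable (Spec_avail l out) := by unfold Spec_avail; infer_instance

-- ===== CLAIM (what is proved, stated in full; the proofs are below) =====
def Claim_equal_avail : Prop := ∀ (l : List Int), Dom_avail l → Spec_avail l (avail l)

-- ===== LEMMAS AND PROOFS =====

/-- A's integer stack (top first) corresponding to B's interval stack: each (lo,hi) expands
to hi, hi-1, …, lo. -/
def expandIv : List (Int × Int) → List (Option Int)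
  | [] => []
  | (lo, hi) :: t => ((PySem.List.pyRange lo (hi + 1) 1).map some).reverse ++ expandIv t

theorem foldl_cons_rev (xs : List Int) (s : List (Option Int)) :
    xs.foldl (fun acc j => some j :: acc) s = (xs.map some).reverse ++ s := by
  induction xs generalizing s with
  | nil => simp
  | cons x t ih => simp [List.foldl_cons, ih]

theorem expand_push (iv : List (Int × Int)) (current i : Int) (h : current < i) :
    expandIv (if current + 1 ≤ i - 1 then (current + 1, i - 1) :: iv else iv)
      = ((PySem.List.pyRange (current + 1) i 1).map some).reverse ++ expandIv iv := by
  split_ifs with hc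
  · have : i - 1 + 1 = i := by omega
    simp [expandIv, this]
  · rw [PySem.List.pyRange_one_eq_nil (by omega : i ≤ current + 1)]
    simp

theorem expand_pop (lo hi : Int) (t : List (Int × Int)) (h : lo ≤ hi) :
    expandIv ((lo, hi) :: t)
      = some hi :: expandIv (if lo ≤ hi - 1 then (lo, hi - 1) :: t else t) := by
  rw [expandIv, PySem.List.pyRange_one_succ_right h]
  split_ifs with hc
  · have : hi - 1 + 1 = hi := by omega
    simp [expandIv, this]
  · have hlo : lo = hi := by omega
    rw [hlo, PySem.List.pyRange_one_eq_nil (le_refl hi)]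
    simp

theorem pop_push (current i : Int) (h : current < i) (s : List (Option Int)) :
    (popA ((PySem.List.pyRange (current + 1) (i + 1) 1).foldl
        (fun acc j => some j :: acc) s)).2
      = ((PySem.List.pyRange (current + 1) i 1).map some).reverse ++ s := by
  rw [foldl_cons_rev, PySem.List.pyRange_one_succ_right (by omega : current + 1 ≤ i)]
  simp [popA]

theorem loop_eq (l : List Int) : ∀ (iv : List (Int × Int)) (r : List (Option Int)) (current : Int),
    (r = [] ∨ r = [none]) →
    (∀ p ∈ iv, p.1 ≤ p.2 ∧ p.2 ≤ current) →
    availLoop l (expandIv iv ++ r) current = availAltLoop l iv current := by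
  induction l with
  | nil => intro iv r current _ _; rfl
  | cons i rest ih =>
    intro iv r current hr hinv
    match iv with
    | [] =>
      have hpop : popA r = (none, []) := by
        rcases hr with h | h <;> subst h <;> rfl
      have hs : expandIv [] ++ r = r := by simp [expandIv]
      rw [hs, availLoop]
      simp only [hpop]
      rw [if_neg (by simp : ¬ (some i : Option Int) = none)]
      by_cases hgt : i > current
      · rw [if_pos hgt, availAltLoop, if_pos hgt]
        rw [pop_push current i hgt [none]]
        have hexp : ((PySem.List.pyRange (current + 1) i 1).map some).reverse ++ [none]
            = expandIv (if current + 1 ≤ i - 1 then (current + 1, i - 1) :: ([] : List (Int × Int)) else []) ++ [none] := by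
          rw [expand_push [] current i hgt]; simp [expandIv]
        rw [hexp]
        refine ih (if current + 1 ≤ i - 1 then [(current + 1, i - 1)] else []) [none] i (Or.inr rfl) ?_
        intro p hp
        split_ifs at hp with hc
        · rcases List.mem_cons.mp hp with hp | hp
          · subst hp; exact ⟨by omega, by omega⟩
          · simp at hp
        · simp at hp
      · rw [if_neg hgt, availAltLoop, if_neg hgt]
    | (lo, hi) :: t =>
      have hlh := hinv (lo, hi) List.mem_cons_self
      have hle : lo ≤ hi := hlh.1
      have hhc : hi ≤ current := hlh.2
      have hinvt : ∀ p ∈ t, p.1 ≤ p.2 ∧ p.2 ≤ current := fun p hp => hinv p (List.mem_cons_of_mem _ hp)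
      rw [expand_pop lo hi t hle, List.cons_append, availLoop]
      simp only [popA]
      by_cases heq : i = hi
      · subst heq
        rw [if_pos rfl]
        have hgt : ¬ i > current := by omega
        rw [availAltLoop, if_neg hgt, if_pos rfl]
        refine ih (if lo ≤ i - 1 then (lo, i - 1) :: t else t) r current hr ?_
        intro p hp
        split_ifs at hp with hc
        · rcases List.mem_cons.mp hp with hp | hp
          · subst hp; exact ⟨by omega, by omega⟩
          · exact hinvt p hp
        · exact hinvt p hp
      · rw [if_neg (by simp [heq])]
        by_cases hgt : i > current
        · rw [if_pos hgt, availAltLoop, if_pos hgt]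
          have hback : some hi :: (expandIv (if lo ≤ hi - 1 then (lo, hi - 1) :: t else t) ++ r)
              = expandIv ((lo, hi) :: t) ++ r := by
            rw [expand_pop lo hi t hle, List.cons_append]
          rw [hback]
          have hpp := pop_push current i hgt (expandIv ((lo, hi) :: t) ++ r)
          simp only [popA] at hpp
          rw [hpp, ← List.append_assoc, ← expand_push ((lo, hi) :: t) current i hgt]
          refine ih (if current + 1 ≤ i - 1 then (current + 1, i - 1) :: (lo, hi) :: t else (lo, hi) :: t) r i hr ?_
          intro p hp
          split_ifs at hp with hc
          · rcases List.mem_cons.mp hp with hp | hp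
            · subst hp; exact ⟨by omega, by omega⟩
            · have := hinv p hp; exact ⟨this.1, by omega⟩
          · have := hinv p hp; exact ⟨this.1, by omega⟩
        · rw [if_neg hgt, availAltLoop, if_neg hgt, if_neg (by omega : ¬ hi = i)]

-- ===== VERDICT (by name: the statement is the Claim_ definition above) =====
theorem avail_spec : Claim_equal_avail := by
  intro l _
  unfold Spec_avail avail avail_alt
  have := loop_eq l [] [] 0 (Or.inl rfl) (by intro p hp; simp at hp)
  simpa [expandIv] using this
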